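-- pv_equiv track=rewrite | github.com/pypi-data/pypi-mirror-178 | packages/tdb-py/tdb-py-0.7.1.tar.gz/tdb-py-0.7.1/tdb.py | _scan
-- ===== SOURCE A (Python) =====
-- def _scan(text, valid, lino):
--     text, lino = _skip_ws(text, lino)
--     end = 0
--     while end < len(text):
--         c = text[end]
--         if c not in valid:
--             return text[end:], text[:end], lino
--         end += 1
--     raise Error(f'E220#{lino}:unexpected end of data')
--
-- def _skip_ws(text, lino):
--     end = 0
--     while end < len(text):
--         c = text[end]
--         if c == '\n':
--             lino += 1
--         if c.isspace():
--             end += 1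
--             continue
--         return text[end:], lino
--     return text, lino
--
-- class Error(Exception):
--     pass
-- ===== SOURCE B (Python) =====
-- class Error(Exception):
--     pass
--
--
-- def _scan(text, valid, lino):
--     # One fused pass over the text: whitespace skipping and the token scan are a
--     # single loop over indices; the token is returned by its start/end indices,
--     # no intermediate stripped string is built.
--     start = None
--     for i, c in enumerate(text):
--         if start is None:
--             if c == '\n':
--                 lino += 1
--             if c.isspace():
--                 continue
--             start = i
--         if c not in valid:
--             return text[i:], text[start:i], lino
--     raise Error(f'E220#{lino}:unexpected end of data')
-- ===== Notes on version B (the rewrite author's own statement) =====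
-- stated objective: simpler
-- what changed: A's two staged loops (a _skip_ws helper that consumes whitespace, then a second scan over the sliced remainder) are fused into one single pass over the whole text that tracks the token's start index in a state variable, slicing only once at the return.
-- outside the precondition, e.g. on _scan('  \n ', 'ab', 1): A returns ('  \n ', '', 2), B raises Error; on _scan(' \n', ' a', 1): A returns ('\n', ' ', 2), B raises Error
import Mathlib
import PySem

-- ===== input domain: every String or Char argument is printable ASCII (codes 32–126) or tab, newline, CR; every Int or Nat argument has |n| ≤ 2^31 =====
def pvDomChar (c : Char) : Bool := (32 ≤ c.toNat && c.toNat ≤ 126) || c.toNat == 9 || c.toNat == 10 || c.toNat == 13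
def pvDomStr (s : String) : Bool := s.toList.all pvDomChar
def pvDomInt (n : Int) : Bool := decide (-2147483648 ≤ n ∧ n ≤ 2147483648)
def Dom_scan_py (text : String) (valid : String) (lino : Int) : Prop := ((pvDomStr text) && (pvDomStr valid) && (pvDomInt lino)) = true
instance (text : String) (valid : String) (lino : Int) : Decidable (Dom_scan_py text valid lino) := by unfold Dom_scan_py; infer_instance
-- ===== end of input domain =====

-- B fuses A's two staged loops (whitespace skip, then valid-scan of the remainder) into ONE
-- pass over the text tracking the token's start index, building no intermediate string (simpler).


-- ===== PORT A =====
-- _skip_ws: while loop over the characters; when every character is whitespace the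
-- FULL original text is returned ('return text, lino'), hence the 'orig' parameter.
def pvSkipWsA (orig : List Char) : List Char → Int → List Char × Int
  | [], lino => (orig, lino)
  | c :: rest, lino =>
    let lino1 := if c = '\n' then lino + 1 else lino
    if PySem.Chars.isspace c then pvSkipWsA orig rest lino1
    else (c :: rest, lino1)

-- _scan's while loop: acc is text[:end]; the final 'raise Error(...)' becomes the
-- default ("", "", lino), excluded by Pre_scan_py.
def pvScanLoopA (valid : List Char) (lino : Int) : List Char → List Char → String × String × Int
  | [], _ => ("", "", lino)
  | c :: rest, acc =>
    if valid.contains c = false then ((c :: rest).asString, acc.asString, lino)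
    else pvScanLoopA valid lino rest (acc ++ [c])

def scan_py (text : String) (valid : String) (lino : Int) : String × String × Int :=
  let p := pvSkipWsA text.toList text.toList lino
  pvScanLoopA valid.toList p.2 p.1 []

-- ===== PORT B =====
-- Source B's single for-loop over enumerate(text); 'T' is the whole text (for the slices
-- text[i:], text[start:i]), 'l' the remaining suffix (l = T.drop i), 'start' the Python
-- 'start' variable (none while still in whitespace). The final 'raise Error(...)'
-- becomes the default ("", "", lino), excluded by Pre_scan_py.
def pvScanLoopB (T valid : List Char) : List Char → Nat → Option Nat → Int → String × String × Int
  | [], _, _, lino => ("", "", lino)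
  | c :: rest, i, none, lino =>
    let lino1 := if c = '\n' then lino + 1 else lino
    if PySem.Chars.isspace c then pvScanLoopB T valid rest (i + 1) none lino1
    else if valid.contains c = false then
      ((T.drop i).asString, (((T.drop i).take 0)).asString, lino1)
    else pvScanLoopB T valid rest (i + 1) (some i) lino1
  | c :: rest, i, some s, lino =>
    if valid.contains c = false then
      ((T.drop i).asString, ((T.drop s).take (i - s)).asString, lino)
    else pvScanLoopB T valid rest (i + 1) (some s) lino

def scan_py_alt (text : String) (valid : String) (lino : Int) : String × String × Int :=
  pvScanLoopB text.toList valid.toList text.toList 0 none lino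

-- ===== PRECONDITION & SPEC =====
-- Pre_ excludes inputs whose text is empty or all-whitespace (A's _skip_ws then leaves the
-- whitespace unconsumed and A may return it as data — an accident B's raise does not mimic)
-- and inputs where every character after the leading whitespace is valid (A raises E220, B too).
def Pre_scan_py (text : String) (valid : String) (lino : Int) : Prop :=
  (PySem.Chars.lstrip text.toList).any (fun c => !(valid.toList.contains c)) = true
instance (text : String) (valid : String) (lino : Int) : Decidable (Pre_scan_py text valid lino) := by
  unfold Pre_scan_py; infer_instance

def pvWitness_scan_py : String × String × Int := ("  ab.", "ab", 1)

def Spec_scan_py (text : String) (valid : String) (lino : Int) (out : String × String × Int) : Prop := out = scan_py_alt text valid lino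
instance (text : String) (valid : String) (lino : Int) (out : String × String × Int) : Decidable (Spec_scan_py text valid lino out) := by unfold Spec_scan_py; infer_instance

-- ===== CLAIM (what is proved, stated in full; the proofs are below) =====
def Claim_equal_scan_py : Prop := ∀ (text : String) (valid : String) (lino : Int), Dom_scan_py text valid lino → Pre_scan_py text valid lino → Spec_scan_py text valid lino (scan_py text valid lino)

-- ===== LEMMAS AND PROOFS =====

-- A's _skip_ws equals dropWhile/takeWhile when something non-whitespace remains.
theorem pvSkipWsA_eq (orig : List Char) (l : List Char) (lino : Int)
    (h : l.dropWhile PySem.Chars.isspace ≠ []) :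
    pvSkipWsA orig l lino =
      (l.dropWhile PySem.Chars.isspace,
       lino + ((l.takeWhile PySem.Chars.isspace).count '\n' : Int)) := by
  induction l generalizing lino with
  | nil => simp [List.dropWhile] at h
  | cons c rest ih =>
    by_cases hs : PySem.Chars.isspace c = true
    · have hrest : rest.dropWhile PySem.Chars.isspace ≠ [] := by
        simpa [List.dropWhile_cons, hs] using h
      rw [pvSkipWsA]
      simp only [hs, if_true]
      rw [ih _ hrest]
      simp only [List.dropWhile_cons, List.takeWhile_cons, hs, if_true, List.count_cons]
      by_cases hc : c = '\n'
      · simp [hc]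
        ring
      · simp [hc]
    · have hc : c ≠ '\n' := by
        intro h'; subst h'; exact hs (by decide)
      rw [pvSkipWsA]
      simp [hs, hc]

-- A's scan loop returns drop/take at the first invalid index.
theorem pvScanLoopA_eq (valid : List Char) (lino : Int) (t acc : List Char) (e : Nat)
    (h : t.findIdx? (fun c => !(valid.contains c)) = some e) :
    pvScanLoopA valid lino t acc =
      ((t.drop e).asString, (acc ++ t.take e).asString, lino) := by
  induction t generalizing acc e with
  | nil => rw [List.findIdx?_nil] at h; exact absurd h (by simp)
  | cons c rest ih =>
    rw [List.findIdx?_cons] at h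
    by_cases hv : valid.contains c = false
    · simp only [hv, Bool.not_false, if_true] at h
      cases h
      rw [pvScanLoopA, if_pos hv]
      simp
    · have hv' : valid.contains c = true := by simpa using hv
      simp only [hv', Bool.not_true, Bool.false_eq_true, if_false, Option.map_eq_some_iff] at h
      obtain ⟨e', he', rfl⟩ := h
      rw [pvScanLoopA, if_neg hv]
      rw [ih _ _ he']
      simp [List.take_succ_cons, List.drop_succ_cons]

-- B's loop in token state (start = some s): drop/take at the first invalid index.
theorem pvScanLoopB_some_eq (T valid : List Char) (l : List Char) (i s : Nat) (lino : Int) (e : Nat)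
    (hl : l = T.drop i) (hsi : s ≤ i)
    (h : l.findIdx? (fun c => !(valid.contains c)) = some e) :
    pvScanLoopB T valid l i (some s) lino =
      ((l.drop e).asString, ((T.drop s).take (i - s + e)).asString, lino) := by
  induction l generalizing i e with
  | nil => rw [List.findIdx?_nil] at h; exact absurd h (by simp)
  | cons c rest ih =>
    rw [List.findIdx?_cons] at h
    by_cases hv : valid.contains c = false
    · simp only [hv, Bool.not_false, if_true] at h
      cases h
      rw [pvScanLoopB, if_pos hv, ← hl]
      simp
    · have hv' : valid.contains c = true := by simpa using hv
      simp only [hv', Bool.not_true, Bool.false_eq_true, if_false, Option.map_eq_some_iff] at h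
      obtain ⟨e', he', rfl⟩ := h
      have hrest : rest = T.drop (i + 1) := by
        rw [← List.tail_drop, ← hl]; rfl
      rw [pvScanLoopB, if_neg hv]
      rw [ih _ _ hrest (by omega) he']
      have : i + 1 - s + e' = i - s + (e' + 1) := by omega
      simp [this]

-- B's loop in whitespace state equals "strip, count newlines, find first invalid".
theorem pvScanLoopB_none_eq (T valid : List Char) (l : List Char) (i : Nat) (lino : Int) (e : Nat)
    (hl : l = T.drop i)
    (h : (l.dropWhile PySem.Chars.isspace).findIdx? (fun c => !(valid.contains c)) = some e) :
    pvScanLoopB T valid l i none lino =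
      (((l.dropWhile PySem.Chars.isspace).drop e).asString,
       ((l.dropWhile PySem.Chars.isspace).take e).asString,
       lino + ((l.takeWhile PySem.Chars.isspace).count '\n' : Int)) := by
  induction l generalizing i lino with
  | nil =>
    rw [List.dropWhile_nil, List.findIdx?_nil] at h
    exact absurd h (by simp)
  | cons c rest ih =>
    have hrest : rest = T.drop (i + 1) := by
      rw [← List.tail_drop, ← hl]; rfl
    by_cases hs : PySem.Chars.isspace c = true
    · rw [pvScanLoopB]
      simp only [hs, if_true]
      rw [List.dropWhile_cons, if_pos hs] at h
      rw [ih _ _ hrest h]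
      simp only [List.dropWhile_cons, List.takeWhile_cons, hs, if_true, List.count_cons]
      by_cases hc : c = '\n'
      · simp [hc]; ring
      · simp [hc]
    · have hc : c ≠ '\n' := by
        intro h'; subst h'; exact hs (by decide)
      rw [List.dropWhile_cons, if_neg hs] at h
      rw [List.findIdx?_cons] at h
      rw [pvScanLoopB]
      simp only [hs, Bool.false_eq_true, if_false, hc, if_neg (by exact hc)]
      by_cases hv : valid.contains c = false
      · simp only [hv, Bool.not_false, if_true] at h
        cases h
        rw [if_pos hv]
        simp [← hl, List.dropWhile_cons, hs, List.takeWhile_cons, hc]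
      · have hv' : valid.contains c = true := by simpa using hv
        simp only [hv', Bool.not_true, Bool.false_eq_true, if_false, Option.map_eq_some_iff] at h
        obtain ⟨e', he', rfl⟩ := h
        rw [if_neg hv]
        rw [pvScanLoopB_some_eq T valid rest (i + 1) i lino e' hrest (by omega) he']
        have hdi : T.drop i = c :: rest := hl.symm
        simp [hdi, List.dropWhile_cons, hs, List.takeWhile_cons, List.take_succ_cons,
          Nat.add_comm 1 e']

theorem scan_py_spec_aux (text valid : String) (lino : Int)
    (hpre : Pre_scan_py text valid lino) :
    scan_py text valid lino = scan_py_alt text valid lino := by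
  unfold Pre_scan_py at hpre
  rw [List.any_eq_true] at hpre
  obtain ⟨c, hc, hcv'⟩ := hpre
  have hcv : valid.toList.contains c = false := by simpa using hcv'
  clear hcv'
  rw [PySem.Chars.lstrip] at hc
  have hne : text.toList.dropWhile PySem.Chars.isspace ≠ [] := by
    intro h; rw [h] at hc; exact (List.not_mem_nil) hc
  have hfind : ∃ e, (text.toList.dropWhile PySem.Chars.isspace).findIdx?
      (fun c => !(valid.toList.contains c)) = some e := by
    cases hf : (text.toList.dropWhile PySem.Chars.isspace).findIdx?
        (fun c => !(valid.toList.contains c)) with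
    | some e => exact ⟨e, rfl⟩
    | none =>
      rw [List.findIdx?_eq_none_iff] at hf
      have h1 := hf c hc
      simp only [Bool.not_eq_false'] at h1
      rw [h1] at hcv
      exact absurd hcv (by simp)
  obtain ⟨e, he⟩ := hfind
  unfold scan_py scan_py_alt
  rw [pvSkipWsA_eq _ _ _ hne]
  rw [pvScanLoopB_none_eq text.toList valid.toList text.toList 0 lino e (by simp) he]
  rw [pvScanLoopA_eq _ _ _ _ _ he]
  simp

-- ===== VERDICT (by name: the statement is the Claim_ definition above) =====
theorem scan_py_spec : Claim_equal_scan_py := by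
  intro text valid lino _hdom hpre
  unfold Spec_scan_py
  exact scan_py_spec_aux text valid lino hpre
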